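-- pv_equiv track=rewrite | github.com/bksuh/code_practice | 프로그래머스/0/181890. 왼쪽 오른쪽/왼쪽 오른쪽.py | solution
-- ===== SOURCE A (Python) =====
-- def solution(str_list):
--     answer = []
--     idx = 0
--     for c in str_list:
--         if c =='l':
--             idx = str_list.index(c)
--             return str_list[:idx]
--         elif c == 'r':
--             idx = str_list.index(c)
--             return str_list[idx+1:]
--     return answer
-- ===== SOURCE B (Python) =====
-- def solution(str_list):
--     n = len(str_list)
--     il = str_list.index('l') if 'l' in str_list else n
--     ir = str_list.index('r') if 'r' in str_list else n
--     if il == n and ir == n: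
--         return []
--     return str_list[:il] if il < ir else str_list[ir + 1:]
-- ===== Notes on version B (the rewrite author's own statement) =====
-- stated objective: simpler
-- what changed: Replaces the element-by-element loop with early returns (plus a redundant inner .index rescan) by two C-level first-index lookups and a single positional comparison.
import Mathlib
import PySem

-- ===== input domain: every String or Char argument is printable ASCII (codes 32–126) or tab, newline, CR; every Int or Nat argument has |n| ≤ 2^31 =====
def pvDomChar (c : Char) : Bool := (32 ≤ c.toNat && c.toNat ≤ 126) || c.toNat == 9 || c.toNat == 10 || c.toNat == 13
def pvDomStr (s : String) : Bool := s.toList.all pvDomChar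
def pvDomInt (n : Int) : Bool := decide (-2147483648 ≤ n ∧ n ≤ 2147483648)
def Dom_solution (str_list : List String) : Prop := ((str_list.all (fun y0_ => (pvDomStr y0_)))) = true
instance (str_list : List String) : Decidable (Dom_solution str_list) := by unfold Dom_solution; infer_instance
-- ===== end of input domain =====

-- B replaces A's element-by-element scan with early returns by two first-index
-- lookups and one positional comparison (objective: simpler).


-- ===== PORT A =====
-- A's for-loop over str_list with early returns; str_list.index(c) always
-- succeeds there (c was just seen in str_list), so .getD 0 only totalises.
def solutionA_loop (orig : List String) : List String → List String
  | [] => []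
  | c :: rest =>
    if c = "l" then
      PySem.List.slice orig none (some (((PySem.List.index? orig c).getD 0 : Nat) : Int))
    else if c = "r" then
      PySem.List.slice orig (some ((((PySem.List.index? orig c).getD 0 : Nat) : Int) + 1)) none
    else solutionA_loop orig rest

def solution (str_list : List String) : List String := solutionA_loop str_list str_list

-- ===== PORT B =====
def solution_alt (str_list : List String) : List String :=
  let n := str_list.length
  let il := if "l" ∈ str_list then (PySem.List.index? str_list "l").getD 0 else n
  let ir := if "r" ∈ str_list then (PySem.List.index? str_list "r").getD 0 else n
  if il = n ∧ ir = n then []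
  else if il < ir then PySem.List.slice str_list none (some (il : Int))
  else PySem.List.slice str_list (some ((ir : Int) + 1)) none

-- ===== PRECONDITION & SPEC =====
def Spec_solution (str_list : List String) (out : List String) : Prop := out = solution_alt str_list
instance (str_list : List String) (out : List String) : Decidable (Spec_solution str_list out) := by unfold Spec_solution; infer_instance

-- ===== CLAIM (what is proved, stated in full; the proofs are below) =====
def Claim_equal_solution : Prop := ∀ (str_list : List String), Dom_solution str_list → Spec_solution str_list (solution str_list)

-- ===== LEMMAS AND PROOFS =====
-- first occurrence of c in pre ++ c :: rest, when c is not in pre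
lemma first_index_self (pre rest : List String) (c : String) (hc : c ∉ pre) :
    PySem.List.index? (pre ++ c :: rest) c = some pre.length := by
  have h : pre ++ c :: rest = (pre ++ [c]) ++ rest := by simp
  rw [h, PySem.List.index?_append_of_mem rest (by simp)]
  exact PySem.List.index?_append_singleton_self _ _ hc

-- the first occurrence of v lies strictly beyond pre ++ [c] when neither holds v
lemma first_index_gt (pre rest : List String) (c v : String) (hv : v ∉ pre) (hc : c ≠ v)
    (j : Nat) (hj : PySem.List.index? (pre ++ c :: rest) v = some j) : pre.length < j := by
  obtain ⟨hk, hval, _⟩ := PySem.List.getElem_of_index?_eq_some hj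
  have hklen : j < pre.length + (rest.length + 1) := by
    simpa [List.length_append] using hk
  by_contra hle
  rw [List.getElem_append] at hval
  split at hval
  · exact hv (hval ▸ List.getElem_mem _)
  · have hj0 : j = pre.length := by omega
    have hc0 : (c :: rest)[j - pre.length]'(by simp; omega) = c := by simp [hj0]
    exact hc (by rw [← hc0, hval])

lemma loop_eq (orig : List String) :
    ∀ (suf pre : List String), orig = pre ++ suf → "l" ∉ pre → "r" ∉ pre →
      solutionA_loop orig suf = solution_alt orig := by
  intro suf
  induction suf with
  | nil =>
    intro pre h hl hr
    subst h
    simp only [List.append_nil] at hl hr ⊢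
    simp [solutionA_loop, solution_alt, hl, hr]
  | cons c rest ih =>
    intro pre h hl hr
    by_cases hcl : c = "l"
    · subst hcl h
      have hi : PySem.List.index? (pre ++ "l" :: rest) "l" = some pre.length :=
        first_index_self pre rest "l" hl
      have hmem : "l" ∈ pre ++ "l" :: rest := by simp
      have hn : pre.length ≠ (pre ++ "l" :: rest).length := by simp
      have hA : solutionA_loop (pre ++ "l" :: rest) ("l" :: rest) =
          PySem.List.slice (pre ++ "l" :: rest) none (some (pre.length : Int)) := by
        simp only [solutionA_loop]
        rw [if_pos trivial, hi]
        simp only [Option.getD_some]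
      rw [hA]
      simp only [solution_alt]
      rw [if_pos hmem, hi]
      simp only [Option.getD_some]
      by_cases hrm : "r" ∈ pre ++ "l" :: rest
      · obtain ⟨j, hj⟩ := Option.isSome_iff_exists.mp
          ((PySem.List.index?_isSome_iff _ _).mpr hrm)
        have hgt := first_index_gt pre rest "l" "r" hr (by decide) j hj
        rw [if_pos hrm, hj]
        simp only [Option.getD_some]
        rw [if_neg (fun hand => hn hand.1), if_pos hgt]
      · have hlt : pre.length < (pre ++ "l" :: rest).length := by simp
        rw [if_neg hrm, if_neg (fun hand => hn hand.1), if_pos hlt]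
    · by_cases hcr : c = "r"
      · subst hcr h
        have hi : PySem.List.index? (pre ++ "r" :: rest) "r" = some pre.length :=
          first_index_self pre rest "r" hr
        have hmem : "r" ∈ pre ++ "r" :: rest := by simp
        have hn : pre.length ≠ (pre ++ "r" :: rest).length := by simp
        have hA : solutionA_loop (pre ++ "r" :: rest) ("r" :: rest) =
            PySem.List.slice (pre ++ "r" :: rest) (some ((pre.length : Int) + 1)) none := by
          simp only [solutionA_loop]
          rw [if_pos trivial, hi]
          simp only [Option.getD_some]
          rw [if_neg (by decide)]
        rw [hA]
        simp only [solution_alt]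
        rw [if_pos hmem, hi]
        simp only [Option.getD_some]
        by_cases hlm : "l" ∈ pre ++ "r" :: rest
        · obtain ⟨j, hj⟩ := Option.isSome_iff_exists.mp
            ((PySem.List.index?_isSome_iff _ _).mpr hlm)
          have hgt := first_index_gt pre rest "r" "l" hl (by decide) j hj
          rw [if_pos hlm, hj]
          simp only [Option.getD_some]
          rw [if_neg (fun hand => hn hand.2), if_neg (by omega)]
        · have hnlt : ¬ (pre ++ "r" :: rest).length < pre.length := by simp
          rw [if_neg hlm, if_neg (fun hand => hn hand.2), if_neg hnlt]
      · have h' : orig = (pre ++ [c]) ++ rest := by simp [h]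
        have hl' : "l" ∉ pre ++ [c] := by
          simp [hl]; exact fun h => hcl h.symm
        have hr' : "r" ∉ pre ++ [c] := by
          simp [hr]; exact fun h => hcr h.symm
        simpa [solutionA_loop, hcl, hcr] using ih (pre ++ [c]) h' hl' hr'

-- ===== VERDICT (by name: the statement is the Claim_ definition above) =====
theorem solution_spec : Claim_equal_solution := by
  intro str_list _
  unfold Spec_solution solution
  exact loop_eq str_list str_list [] rfl (by simp) (by simp)
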